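-- pv_equiv track=rewrite | github.com/seongY0-0n/Coding-Study | 프로그래머스/1/133499. 옹알이 （2）/옹알이 （2）.py | solution
-- ===== SOURCE A (Python) =====
-- def solution(babbling):
--     answer = 0
--
--     for b in babbling:
--         flag = True
--         temp = ""
--         while b:
--             if len(b)<2:
--                 flag = False
--                 break
--             elif b[:2] == "ye" and temp != "ye":
--                 temp = "ye"
--                 b=b[2:]
--             elif b[:2] == "ma" and temp !="ma":
--                 temp = "ma"
--                 b=b[2:]
--             elif b[:3] == "aya" and temp != "aya":
--                 temp = "aya"
--                 b=b[3:]
--             elif b[:3] == "woo" and temp != "woo":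
--                 temp = "woo"
--                 b=b[3:]
--             else:
--                 flag = False
--                 break
--         if flag:
--             answer+=1
--     return answer
-- ===== SOURCE B (Python) =====
-- def solution(babbling):
--     def tokens(b):
--         ts = []
--         while b:
--             for w in ("aya", "ye", "woo", "ma"):
--                 if b.startswith(w):
--                     ts.append(w)
--                     b = b[len(w):]
--                     break
--             else:
--                 return None
--         return ts
--     count = 0
--     for b in babbling:
--         ts = tokens(b)
--         if ts is not None and all(x != y for x, y in zip(ts, ts[1:])):
--             count += 1
--     return count
-- ===== Notes on version B (the rewrite author's own statement) =====
-- stated objective: simpler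
-- what changed: A fuses parsing and the no-consecutive-repeat check into one greedy while-loop carrying the last token in `temp`; B decomposes it into two phases: a greedy tokenizer that yields the (unique, since token first letters differ) token list, then a separate check that adjacent tokens differ, counted with a comprehension-style sum.
import Mathlib
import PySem

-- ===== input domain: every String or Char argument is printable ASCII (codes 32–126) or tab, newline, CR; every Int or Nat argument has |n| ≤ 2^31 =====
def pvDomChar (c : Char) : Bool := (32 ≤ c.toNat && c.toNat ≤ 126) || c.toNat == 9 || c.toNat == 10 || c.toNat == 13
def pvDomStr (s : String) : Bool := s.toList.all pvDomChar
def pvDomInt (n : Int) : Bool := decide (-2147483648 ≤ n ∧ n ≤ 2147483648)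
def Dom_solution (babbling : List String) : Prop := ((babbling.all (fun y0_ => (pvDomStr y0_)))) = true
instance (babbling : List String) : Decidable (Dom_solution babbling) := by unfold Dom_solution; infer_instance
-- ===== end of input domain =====

-- B replaces A's fused greedy while-loop (parse + repeat check in one pass with `temp`)
-- by a two-phase decomposition: tokenize the string into its unique token list, then
-- check adjacent tokens differ; objective: simpler (no speed claim).

-- ===== PORT A =====
-- A's while-loop over b with last-token `temp`; slices b[:2]/b[2:] are take/drop on chars (exact).
def loopA (b : List Char) (temp : String) : Bool :=
  if b = [] then true
  else if b.length < 2 then false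
  else if b.take 2 = ['y','e'] ∧ temp ≠ "ye" then loopA (b.drop 2) "ye"
  else if b.take 2 = ['m','a'] ∧ temp ≠ "ma" then loopA (b.drop 2) "ma"
  else if b.take 3 = ['a','y','a'] ∧ temp ≠ "aya" then loopA (b.drop 3) "aya"
  else if b.take 3 = ['w','o','o'] ∧ temp ≠ "woo" then loopA (b.drop 3) "woo"
  else false
termination_by b.length
decreasing_by
  all_goals
    (have hb : b ≠ [] := by assumption
     have := List.length_pos_of_ne_nil hb
     simp [List.length_drop]; omega)

def solution (babbling : List String) : Int :=
  babbling.foldl (fun answer b => if loopA b.toList "" then answer + 1 else answer) 0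

-- ===== PORT B =====
-- B phase 1: greedy tokenizer, returns the token list or none.
def tokB (b : List Char) : Option (List String) :=
  if b = [] then some []
  else if ['a','y','a'].isPrefixOf b then (tokB (b.drop 3)).map (fun ts => "aya" :: ts)
  else if ['y','e'].isPrefixOf b then (tokB (b.drop 2)).map (fun ts => "ye" :: ts)
  else if ['w','o','o'].isPrefixOf b then (tokB (b.drop 3)).map (fun ts => "woo" :: ts)
  else if ['m','a'].isPrefixOf b then (tokB (b.drop 2)).map (fun ts => "ma" :: ts)
  else none
termination_by b.length
decreasing_by
  all_goals
    (have hb : b ≠ [] := by assumption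
     have := List.length_pos_of_ne_nil hb
     simp [List.length_drop]; omega)

-- B phase 2: all adjacent pairs distinct (Python: all(x != y for x, y in zip(ts, ts[1:]))).
def noAdj (ts : List String) : Bool :=
  (ts.zip ts.tail).all (fun p => p.1 ≠ p.2)

def okB (b : List Char) : Bool :=
  match tokB b with
  | none => false
  | some ts => noAdj ts

def solution_alt (babbling : List String) : Int :=
  Int.ofNat (babbling.countP (fun b => okB b.toList))

-- ===== PRECONDITION & SPEC =====
def Spec_solution (babbling : List String) (out : Int) : Prop := out = solution_alt babbling
instance (babbling : List String) (out : Int) : Decidable (Spec_solution babbling out) := by unfold Spec_solution; infer_instance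

-- ===== CLAIM (what is proved, stated in full; the proofs are below) =====
def Claim_equal_solution : Prop := ∀ (babbling : List String), Dom_solution babbling → Spec_solution babbling (solution babbling)

-- ===== LEMMAS AND PROOFS =====

-- bridge: chain of "last token differs from next", seeded with temp.
def chainNe (temp : String) : List String → Bool
  | [] => true
  | t :: ts => (decide (temp ≠ t)) && chainNe t ts

theorem chainNe_eq (ts : List String) : ∀ y : String,
    chainNe y ts = ((match ts with | [] => true | z :: _ => decide (y ≠ z)) && noAdj ts) := by
  induction ts with
  | nil => intro y; simp [chainNe, noAdj]
  | cons z ts ih =>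
    intro y
    cases ts with
    | nil => simp [chainNe, noAdj]
    | cons w ts' =>
      rw [chainNe, ih z]
      simp [noAdj, Bool.and_assoc]

theorem prefix_iff_take {l b : List Char} : l.isPrefixOf b = true ↔ b.take l.length = l := by
  rw [List.isPrefixOf_iff_prefix, List.prefix_iff_eq_take]
  exact ⟨fun h => h.symm, fun h => h.symm⟩

theorem take2_of_take3 {b : List Char} {x y z : Char} (h : b.take 3 = [x, y, z]) :
    b.take 2 = [x, y] := by
  have : b.take 2 = (b.take 3).take 2 := by
    rw [List.take_take]; norm_num
  rw [this, h]
  rfl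

theorem loopA_eq_tokB : ∀ (n : Nat) (b : List Char), b.length ≤ n → ∀ temp : String,
    loopA b temp = ((tokB b).map (chainNe temp)).getD false := by
  intro n
  induction n with
  | zero =>
    intro b hb temp
    have : b = [] := by cases b <;> simp_all
    subst this
    rw [loopA, tokB]; simp [chainNe]
  | succ n ih =>
    intro b hb temp
    by_cases h0 : b = []
    · subst h0; rw [loopA, tokB]; simp [chainNe]
    have hlen := List.length_pos_of_ne_nil h0
    rw [loopA, tokB]
    by_cases h1 : b.length < 2
    · -- single char: no branch can fire on either side
      have t2 : b.take 2 ≠ ['y','e'] := by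
        intro h; have := congrArg List.length h; simp at this; omega
      have t2' : b.take 2 ≠ ['m','a'] := by
        intro h; have := congrArg List.length h; simp at this; omega
      have t3 : b.take 3 ≠ ['a','y','a'] := by
        intro h; have := congrArg List.length h; simp at this; omega
      have t3' : b.take 3 ≠ ['w','o','o'] := by
        intro h; have := congrArg List.length h; simp at this; omega
      have p1 : ¬ (['a','y','a'].isPrefixOf b = true) := fun h => t3 (prefix_iff_take.mp h)
      have p2 : ¬ (['y','e'].isPrefixOf b = true) := fun h => t2 (prefix_iff_take.mp h)
      have p3 : ¬ (['w','o','o'].isPrefixOf b = true) := fun h => t3' (prefix_iff_take.mp h)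
      have p4 : ¬ (['m','a'].isPrefixOf b = true) := fun h => t2' (prefix_iff_take.mp h)
      simp [h0, h1, t2, t2', t3, t3', p1, p2, p3, p4]
    -- length ≥ 2
    have hdrop2 : (b.drop 2).length ≤ n := by simp [List.length_drop]; omega
    have hdrop3 : (b.drop 3).length ≤ n := by simp [List.length_drop]; omega
    by_cases cya : b.take 3 = ['a','y','a']
    · have cya2 : b.take 2 = ['a','y'] := take2_of_take3 cya
      have pya : ['a','y','a'].isPrefixOf b = true := prefix_iff_take.mpr cya
      have nye : b.take 2 ≠ ['y','e'] := by rw [cya2]; simp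
      have nma : b.take 2 ≠ ['m','a'] := by rw [cya2]; simp
      have nwo : b.take 3 ≠ ['w','o','o'] := by rw [cya]; simp
      by_cases ht : temp = "aya"
      · subst ht
        simp only [h0, h1, cya, nye, nma, nwo, pya, if_neg, if_pos, ite_false, ite_true,
          ne_eq, not_true_eq_false, and_false, false_and, if_false]
        cases htk : tokB (b.drop 3) <;> simp [htk, chainNe]
      · rw [ih (b.drop 3) hdrop3 "aya"]
        simp only [h0, h1, cya, nye, nma, nwo, pya, ht, ite_false, ite_true,
          ne_eq, not_false_eq_true, and_true, and_false, false_and]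
        cases htk : tokB (b.drop 3) <;> simp [htk, chainNe, ht]
    by_cases cye : b.take 2 = ['y','e']
    · have pye : ['y','e'].isPrefixOf b = true := prefix_iff_take.mpr cye
      have npya : ¬ (['a','y','a'].isPrefixOf b = true) := fun h => cya (prefix_iff_take.mp h)
      have nma : b.take 2 ≠ ['m','a'] := by rw [cye]; simp
      have nwo : b.take 3 ≠ ['w','o','o'] := by
        intro h; have := take2_of_take3 h; rw [cye] at this; simp at this
      by_cases ht : temp = "ye"
      · subst ht
        simp only [h0, h1, cye, cya, nma, nwo, npya, pye, ite_false, ite_true,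
          ne_eq, not_true_eq_false, and_false, false_and]
        cases htk : tokB (b.drop 2) <;> simp [htk, chainNe]
      · rw [ih (b.drop 2) hdrop2 "ye"]
        simp only [h0, h1, cye, cya, nma, nwo, npya, pye, ht, ite_false, ite_true,
          ne_eq, not_false_eq_true, and_true, and_false, false_and]
        cases htk : tokB (b.drop 2) <;> simp [htk, chainNe, ht]
    by_cases cwo : b.take 3 = ['w','o','o']
    · have cwo2 : b.take 2 = ['w','o'] := take2_of_take3 cwo
      have pwo : ['w','o','o'].isPrefixOf b = true := prefix_iff_take.mpr cwo
      have npya : ¬ (['a','y','a'].isPrefixOf b = true) := fun h => cya (prefix_iff_take.mp h)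
      have npye : ¬ (['y','e'].isPrefixOf b = true) := fun h => cye (prefix_iff_take.mp h)
      have nma : b.take 2 ≠ ['m','a'] := by rw [cwo2]; simp
      by_cases ht : temp = "woo"
      · subst ht
        simp only [h0, h1, cwo, cye, cya, nma, npya, npye, pwo, ite_false, ite_true,
          ne_eq, not_true_eq_false, and_false, false_and]
        cases htk : tokB (b.drop 3) <;> simp [htk, chainNe]
      · rw [ih (b.drop 3) hdrop3 "woo"]
        simp only [h0, h1, cwo, cye, cya, nma, npya, npye, pwo, ht, ite_false, ite_true,
          ne_eq, not_false_eq_true, and_true, and_false, false_and]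
        cases htk : tokB (b.drop 3) <;> simp [htk, chainNe, ht]
    by_cases cma : b.take 2 = ['m','a']
    · have pma : ['m','a'].isPrefixOf b = true := prefix_iff_take.mpr cma
      have npya : ¬ (['a','y','a'].isPrefixOf b = true) := fun h => cya (prefix_iff_take.mp h)
      have npye : ¬ (['y','e'].isPrefixOf b = true) := fun h => cye (prefix_iff_take.mp h)
      have npwo : ¬ (['w','o','o'].isPrefixOf b = true) := fun h => cwo (prefix_iff_take.mp h)
      by_cases ht : temp = "ma"
      · subst ht
        simp only [h0, h1, cma, cye, cya, cwo, npya, npye, npwo, pma, ite_false, ite_true,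
          ne_eq, not_true_eq_false, and_false, false_and]
        cases htk : tokB (b.drop 2) <;> simp [htk, chainNe]
      · rw [ih (b.drop 2) hdrop2 "ma"]
        simp only [h0, h1, cma, cye, cya, cwo, npya, npye, npwo, pma, ht, ite_false, ite_true,
          ne_eq, not_false_eq_true, and_true, and_false, false_and]
        cases htk : tokB (b.drop 2) <;> simp [htk, chainNe, ht]
    -- no token matches
    have npya : ¬ (['a','y','a'].isPrefixOf b = true) := fun h => cya (prefix_iff_take.mp h)
    have npye : ¬ (['y','e'].isPrefixOf b = true) := fun h => cye (prefix_iff_take.mp h)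
    have npwo : ¬ (['w','o','o'].isPrefixOf b = true) := fun h => cwo (prefix_iff_take.mp h)
    have npma : ¬ (['m','a'].isPrefixOf b = true) := fun h => cma (prefix_iff_take.mp h)
    simp [h0, h1, cya, cye, cwo, cma, npya, npye, npwo, npma]

-- every token produced by the tokenizer is nonempty
theorem tokB_ne_empty : ∀ (n : Nat) (b : List Char), b.length ≤ n → ∀ ts, tokB b = some ts →
    ∀ t ∈ ts, t ≠ "" := by
  intro n
  induction n with
  | zero =>
    intro b hb ts hts
    have : b = [] := by cases b <;> simp_all
    subst this
    rw [tokB] at hts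
    simp at hts
    subst hts; simp
  | succ n ih =>
    intro b hb ts hts
    by_cases h0 : b = []
    · subst h0; rw [tokB] at hts; simp at hts; subst hts; simp
    have hlen := List.length_pos_of_ne_nil h0
    have hdrop2 : (b.drop 2).length ≤ n := by simp [List.length_drop]; omega
    have hdrop3 : (b.drop 3).length ≤ n := by simp [List.length_drop]; omega
    rw [tokB, if_neg h0] at hts
    split_ifs at hts with g1 g2 g3 g4
    · rcases Option.map_eq_some_iff.mp hts with ⟨ts', htk, rfl⟩
      intro t ht
      rcases List.mem_cons.mp ht with rfl | ht
      · simp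
      · exact ih _ hdrop3 _ htk t ht
    · rcases Option.map_eq_some_iff.mp hts with ⟨ts', htk, rfl⟩
      intro t ht
      rcases List.mem_cons.mp ht with rfl | ht
      · simp
      · exact ih _ hdrop2 _ htk t ht
    · rcases Option.map_eq_some_iff.mp hts with ⟨ts', htk, rfl⟩
      intro t ht
      rcases List.mem_cons.mp ht with rfl | ht
      · simp
      · exact ih _ hdrop3 _ htk t ht
    · rcases Option.map_eq_some_iff.mp hts with ⟨ts', htk, rfl⟩
      intro t ht
      rcases List.mem_cons.mp ht with rfl | ht
      · simp
      · exact ih _ hdrop2 _ htk t ht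

theorem flag_eq_ok (b : List Char) : loopA b "" = okB b := by
  rw [loopA_eq_tokB b.length b (le_refl _) ""]
  unfold okB
  cases htk : tokB b with
  | none => simp
  | some ts =>
    simp only [Option.map_some, Option.getD_some]
    rw [chainNe_eq]
    cases ts with
    | nil => simp [noAdj]
    | cons z ts' =>
      have hz : z ≠ "" :=
        tokB_ne_empty b.length b (le_refl _) _ htk z (by simp)
      simp [Ne.symm hz]

theorem count_fold (l : List String) : ∀ acc : Int,
    l.foldl (fun answer b => if loopA b.toList "" then answer + 1 else answer) acc
      = acc + Int.ofNat (l.countP (fun b => okB b.toList)) := by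
  induction l with
  | nil => intro acc; simp
  | cons x l ih =>
    intro acc
    rw [List.foldl_cons, ih, List.countP_cons, flag_eq_ok]
    by_cases h : okB x.toList = true
    · simp [h]; ring
    · simp [h]

-- ===== VERDICT (by name: the statement is the Claim_ definition above) =====
theorem solution_spec : Claim_equal_solution := by
  intro babbling _
  unfold Spec_solution solution solution_alt
  rw [count_fold]
  simp
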